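-- pv_equiv track=rewrite | github.com/veraguillen/cometa-data-pipeline | src/core/db_writer.py | _normalize_company_key
-- ===== SOURCE A (Python) =====
-- COMPANY_BUCKET: dict[str, str] = {
--     # ── Fondo VII (10 compañías) ───────────────────────────────────────────────
--     "conekta":     "SAAS",
--     "kueski":      "LEND",
--     "mpower":      "LEND",
--     "bnext":       "SAAS",
--     "yotepresto":  "LEND",
--     "ivoy":        "ECOM",
--     "bewe":        "SAAS",
--     "skydropx":    "ECOM",
--     "gaia":        "SAAS",   # Fondo VII — insurtech/sustainability
--     # ── Fondo CIII (20 compañías) ─────────────────────────────────────────────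
--     "simetrik":    "SAAS",
--     "guros":       "INSUR",
--     "quinio":      "ECOM",
--     "hackmetrix":  "SAAS",
--     "hunty":       "SAAS",
--     "atani":       "OTH",
--     "cluvi":       "SAAS",
--     "kuona":       "SAAS",
--     "prometeo":    "OTH",
--     "territorium": "SAAS",
--     "morgana":     "INSUR",
--     "duppla":      "LEND",
--     "kala":        "OTH",
--     "pulsar":      "SAAS",
--     "solvento":    "LEND",
--     "numia":       "SAAS",
-- }
--
-- def _normalize_company_key(company_id: str) -> str:
--     """
--     Derive the canonical COMPANY_BUCKET key from a raw company_id string.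
--
--     Strategy (applied in order, stops at first match):
--     1. Strip domain suffix and lowercase:  "simetrik.com" → "simetrik"
--     2. Exact match against COMPANY_BUCKET keys          → return immediately
--     3. Strip hyphens/underscores, exact match           → return immediately
--     4. Prefix match: raw starts with "<key>-" or "<key>_"
--        Handles "m1-insurtech" → "m1", "bnext-mx" → "bnext"
--     5. Fallback to stripped string (for dim_company SQL query)
--
--     This prevents OBS-05: guiones que son sufijos de país/producto no deben
--     eliminar la raíz de la clave (ej. "m1-insurtech" → "m1", no "m1insurtech").
--     """
--     base = company_id.lower().split(".")[0]   # strip domain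
--
--     # Step 2: exact match (most common case: "simetrik", "kueski", etc.)
--     if base in COMPANY_BUCKET:
--         return base
--
--     # Step 3: stripped exact match ("yote_presto" → "yotepresto")
--     stripped = base.replace("-", "").replace("_", "")
--     if stripped in COMPANY_BUCKET:
--         return stripped
--
--     # Step 4: prefix match — check if base starts with "<key>-" or "<key>_"
--     # Sorted longest-first to avoid "m" matching before "m1"
--     for key in sorted(COMPANY_BUCKET.keys(), key=len, reverse=True):
--         if base.startswith(key + "-") or base.startswith(key + "_"):
--             return key
--
--     # Step 5: fallback — return stripped for the SQL query; will show in_dim_company=False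
--     return stripped
-- ===== SOURCE B (Python) =====
-- COMPANY_BUCKET: dict[str, str] = {
--     "conekta":     "SAAS",
--     "kueski":      "LEND",
--     "mpower":      "LEND",
--     "bnext":       "SAAS",
--     "yotepresto":  "LEND",
--     "ivoy":        "ECOM",
--     "bewe":        "SAAS",
--     "skydropx":    "ECOM",
--     "gaia":        "SAAS",
--     "simetrik":    "SAAS",
--     "guros":       "INSUR",
--     "quinio":      "ECOM",
--     "hackmetrix":  "SAAS",
--     "hunty":       "SAAS",
--     "atani":       "OTH",
--     "cluvi":       "SAAS",
--     "kuona":       "SAAS",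
--     "prometeo":    "OTH",
--     "territorium": "SAAS",
--     "morgana":     "INSUR",
--     "duppla":      "LEND",
--     "kala":        "OTH",
--     "pulsar":      "SAAS",
--     "solvento":    "LEND",
--     "numia":       "SAAS",
-- }
--
--
-- def _normalize_company_key(company_id: str) -> str:
--     # One pass over base builds BOTH the separator-stripped string and the
--     # longest bucket-key prefix ending at a '-'/'_' (A instead does two
--     # staged replace() calls plus a loop over all 25 length-sorted keys).
--     base = company_id.lower().split(".")[0]
--     if base in COMPANY_BUCKET:
--         return base
--     kept = []
--     best = None
--     for i, ch in enumerate(base):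
--         if ch in "-_":
--             if base[:i] in COMPANY_BUCKET:
--                 best = base[:i]
--         else:
--             kept.append(ch)
--     stripped = "".join(kept)
--     if stripped in COMPANY_BUCKET:
--         return stripped
--     return best if best is not None else stripped
-- ===== Notes on version B (the rewrite author's own statement) =====
-- stated objective: alternative
-- what changed: A's two staged replace() passes plus a step-4 loop over all 25 length-sorted COMPANY_BUCKET keys are replaced by a single enumerate pass over the input that simultaneously accumulates the separator-stripped string and the longest bucket-key prefix ending at a hyphen or underscore separator; steps 1-2 and the final fallback order are unchanged.
import Mathlib
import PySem

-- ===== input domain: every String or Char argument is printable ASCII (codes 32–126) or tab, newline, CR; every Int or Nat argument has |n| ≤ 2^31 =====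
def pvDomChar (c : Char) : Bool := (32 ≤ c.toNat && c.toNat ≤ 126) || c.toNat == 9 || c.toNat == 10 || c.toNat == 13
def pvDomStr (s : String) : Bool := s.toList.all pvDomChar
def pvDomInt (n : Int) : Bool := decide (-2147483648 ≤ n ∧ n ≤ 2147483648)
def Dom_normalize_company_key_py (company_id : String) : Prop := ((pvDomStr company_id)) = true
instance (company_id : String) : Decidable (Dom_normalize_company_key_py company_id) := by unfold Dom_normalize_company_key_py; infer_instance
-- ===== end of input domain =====

-- B replaces A's two staged replace() passes plus the loop over all 25 length-sorted bucket keys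
-- by ONE pass over the input that simultaneously builds the separator-stripped string and the
-- longest bucket-key prefix ending at a separator (objective: alternative).

-- COMPANY_BUCKET (module constant; keys kept as List Char — string facts are proved on the list side)
def pvBucket : PySem.Dict (List Char) String := PySem.Dict.ofList
  [ ("conekta".toList, "SAAS"), ("kueski".toList, "LEND"), ("mpower".toList, "LEND")
  , ("bnext".toList, "SAAS"), ("yotepresto".toList, "LEND"), ("ivoy".toList, "ECOM")
  , ("bewe".toList, "SAAS"), ("skydropx".toList, "ECOM"), ("gaia".toList, "SAAS")
  , ("simetrik".toList, "SAAS"), ("guros".toList, "INSUR"), ("quinio".toList, "ECOM")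
  , ("hackmetrix".toList, "SAAS"), ("hunty".toList, "SAAS"), ("atani".toList, "OTH")
  , ("cluvi".toList, "SAAS"), ("kuona".toList, "SAAS"), ("prometeo".toList, "OTH")
  , ("territorium".toList, "SAAS"), ("morgana".toList, "INSUR"), ("duppla".toList, "LEND")
  , ("kala".toList, "OTH"), ("pulsar".toList, "SAAS"), ("solvento".toList, "LEND")
  , ("numia".toList, "SAAS") ]

-- ===== PORT A =====
-- A's step-4 loop: for key in sorted(keys, key=len, reverse=True): if base.startswith(key+"-") or base.startswith(key+"_"): return key
def pvALoop (base stripped : List Char) : List (List Char) → List Char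
  | [] => stripped
  | k :: ks =>
      if PySem.Chars.startswith base (k ++ ['-']) || PySem.Chars.startswith base (k ++ ['_'])
      then k else pvALoop base stripped ks

def normalize_company_key_py (company_id : String) : String :=
  -- base = company_id.lower().split(".")[0]   ('.' is a nonempty separator, so split is never empty and [0] is its head)
  let base := (PySem.Chars.splitOn (PySem.Chars.lower company_id.toList) ['.']).headD []
  if pvBucket.contains base then String.ofList base
  else
    let stripped := PySem.Chars.replace (PySem.Chars.replace base ['-'] []) ['_'] []
    if pvBucket.contains stripped then String.ofList stripped
    else String.ofList (pvALoop base stripped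
      (PySem.List.sorted pvBucket.keys (fun k => PySem.Chars.len k) true))

-- ===== PORT B =====
-- B's loop body: for i, ch in enumerate(base): if ch in "-_": (if base[:i] in COMPANY_BUCKET: best = base[:i]) else: kept.append(ch)
def pvBStep (base : List Char) (acc : List Char × Option (List Char)) (p : Int × Char) :
    List Char × Option (List Char) :=
  if PySem.Chars.isIn [p.2] ['-', '_'] then
    if pvBucket.contains (PySem.List.slice base none (some p.1))
    then (acc.1, some (PySem.List.slice base none (some p.1)))
    else acc
  else (acc.1 ++ [p.2], acc.2)

def normalize_company_key_py_alt (company_id : String) : String :=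
  let base := (PySem.Chars.splitOn (PySem.Chars.lower company_id.toList) ['.']).headD []
  if pvBucket.contains base then String.ofList base
  else
    let r := (PySem.List.enumerate base 0).foldl (pvBStep base) ([], none)
    -- stripped = "".join(kept)
    let stripped := r.1
    if pvBucket.contains stripped then String.ofList stripped
    else
      match r.2 with
      | some b => String.ofList b
      | none => String.ofList stripped

-- ===== PRECONDITION & SPEC =====
def Spec_normalize_company_key_py (company_id : String) (out : String) : Prop := out = normalize_company_key_py_alt company_id
instance (company_id : String) (out : String) : Decidable (Spec_normalize_company_key_py company_id out) := by unfold Spec_normalize_company_key_py; infer_instance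

-- ===== CLAIM (what is proved, stated in full; the proofs are below) =====
def Claim_equal_normalize_company_key_py : Prop := ∀ (company_id : String), Dom_normalize_company_key_py company_id → Spec_normalize_company_key_py company_id (normalize_company_key_py company_id)

-- ===== LEMMAS AND PROOFS =====

-- B's per-index match condition, as a predicate on an (index, char) pair
def pvCond (base : List Char) (p : Int × Char) : Bool :=
  PySem.Chars.isIn [p.2] ['-', '_'] && pvBucket.contains (PySem.List.slice base none (some p.1))

-- (k ++ [c]) is a prefix of base iff k is and the character right after k is c
lemma pv_prefix_snoc_iff (k : List Char) (c : Char) (base : List Char) :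
    (k ++ [c]) <+: base ↔ (k <+: base ∧ base[k.length]? = some c) := by
  constructor
  · rintro ⟨r, hr⟩
    subst hr
    refine ⟨⟨[c] ++ r, by simp⟩, ?_⟩
    simp
  · rintro ⟨⟨r, hr⟩, hc⟩
    subst hr
    rw [List.getElem?_append_right (by omega)] at hc
    simp at hc
    cases r with
    | nil => simp at hc
    | cons a t => simp at hc; exact ⟨t, by simp [hc]⟩

-- a one-character string is contained in a string iff its character is a member
lemma pv_isIn_singleton (c : Char) (l : List Char) :
    PySem.Chars.isIn [c] l = true ↔ c ∈ l := by
  rw [PySem.Chars.isIn_iff_infix]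
  constructor
  · intro h; simpa using h.sublist.subset
  · intro h
    obtain ⟨s, t, rfl⟩ := List.append_of_mem h
    exact ⟨s, t, by simp⟩

-- replace(s, c, "") with a one-character pattern is the filter dropping that character
lemma pv_replace_go_filter (c : Char) (fuel : Nat) :
    ∀ (l acc : List Char), l.length ≤ fuel →
      PySem.Chars.replace.go [c] [] fuel l acc = acc.reverse ++ l.filter (fun x => !(x == c)) := by
  induction fuel with
  | zero =>
    intro l acc h
    have : l = [] := List.eq_nil_of_length_eq_zero (by omega)
    subst this
    simp [PySem.Chars.replace.go]
  | succ n ih =>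
    intro l acc h
    cases l with
    | nil => simp [PySem.Chars.replace.go]
    | cons a t =>
      simp only [PySem.Chars.replace.go]
      by_cases hca : c = a
      · subst hca
        simp only [List.isPrefixOf, BEq.rfl, Bool.true_and, if_true]
        rw [ih _ _ (by simpa using Nat.le_of_succ_le_succ h)]
        simp
      · have : ([c].isPrefixOf (a :: t)) = false := by
          simp [List.isPrefixOf]; exact fun h => hca h
        rw [this]
        simp only [Bool.false_eq_true, if_false]
        rw [ih _ _ (by simpa using Nat.le_of_succ_le_succ h)]
        simp [Ne.symm hca]

lemma pv_replace_filter (c : Char) (l : List Char) :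
    PySem.Chars.replace l [c] [] = l.filter (fun x => !(x == c)) := by
  rw [PySem.Chars.replace]
  simp only [List.isEmpty_cons, Bool.false_eq_true, if_false]
  simpa using pv_replace_go_filter c l.length l [] le_rfl

-- the two staged replaces of A equal the one-pass filter of B
lemma pv_stripped_eq (base : List Char) :
    PySem.Chars.replace (PySem.Chars.replace base ['-'] []) ['_'] []
      = base.filter (fun x => !(PySem.Chars.isIn [x] ['-', '_'])) := by
  rw [pv_replace_filter, pv_replace_filter, List.filter_filter]
  apply List.filter_congr
  intro x _
  have : PySem.Chars.isIn [x] ['-', '_'] = (x == '-' || x == '_') := by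
    rw [Bool.eq_iff_iff, pv_isIn_singleton]
    simp
  rw [this]
  cases h1 : (x == '-') <;> cases h2 : (x == '_') <;> simp_all

-- B's fold, characterised: first component appends the non-separator chars,
-- second component is the LAST match of pvCond (= first match of the reversed pair list)
lemma pv_fold_spec (base : List Char) (ps : List (Int × Char)) :
    ∀ (k0 : List Char) (b0 : Option (List Char)),
    ps.foldl (pvBStep base) (k0, b0)
      = (k0 ++ ps.filterMap (fun p => if PySem.Chars.isIn [p.2] ['-', '_'] then none else some p.2),
         match ps.reverse.find? (pvCond base) with
         | some p => some (PySem.List.slice base none (some p.1))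
         | none => b0) := by
  induction ps with
  | nil => intro k0 b0; simp
  | cons p ps ih =>
    intro k0 b0
    rw [List.foldl_cons, List.reverse_cons, List.find?_append]
    by_cases hsep : PySem.Chars.isIn [p.2] ['-', '_'] = true
    · by_cases hct : pvBucket.contains (PySem.List.slice base none (some p.1)) = true
      · have hc : pvCond base p = true := by simp [pvCond, hsep, hct]
        rw [show pvBStep base (k0, b0) p = (k0, some (PySem.List.slice base none (some p.1))) by
          simp [pvBStep, hsep, hct]]
        rw [ih]
        cases ps.reverse.find? (pvCond base) <;> simp [hsep, hc]
      · have hc : pvCond base p = false := by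
          simp [pvCond, hct]
        rw [show pvBStep base (k0, b0) p = (k0, b0) by simp [pvBStep, hsep, hct]]
        rw [ih]
        cases ps.reverse.find? (pvCond base) <;> simp [hsep, hc]
    · have hc : pvCond base p = false := by
        simp [pvCond, hsep]
      rw [show pvBStep base (k0, b0) p = (k0 ++ [p.2], b0) by simp [pvBStep, hsep]]
      rw [ih]
      cases ps.reverse.find? (pvCond base) <;> simp [hsep, hc]
  
-- the dropped/kept characters of the enumerate fold are exactly the filter
lemma pv_filterMap_enumerate (xs : List Char) :
    ∀ s : Int, (PySem.List.enumerate xs s).filterMap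
        (fun p => if PySem.Chars.isIn [p.2] ['-', '_'] then none else some p.2)
      = xs.filter (fun c => !(PySem.Chars.isIn [c] ['-', '_'])) := by
  induction xs with
  | nil => intro s; simp [PySem.List.enumerate_nil]
  | cons x xs ih =>
    intro s
    rw [PySem.List.enumerate_cons, List.filterMap_cons, List.filter_cons]
    cases h : PySem.Chars.isIn [x] ['-', '_'] <;> simp [ih]

-- A's loop is find? over the key list
lemma pvALoop_eq_find (base stripped : List Char) (ks : List (List Char)) :
    pvALoop base stripped ks
      = ((ks.find? (fun k => PySem.Chars.startswith base (k ++ ['-'])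
            || PySem.Chars.startswith base (k ++ ['_']))).getD stripped) := by
  induction ks with
  | nil => rfl
  | cons k ks ih =>
    rw [pvALoop, List.find?_cons]
    cases hc : (PySem.Chars.startswith base (k ++ ['-']) || PySem.Chars.startswith base (k ++ ['_'])) <;>
      simp [ih]

-- find? on a strictly descending list returns the maximal satisfying element
lemma pv_find?_desc_eq_some {is : List Int} {cond : Int → Bool} {j : Int}
    (hPW : is.Pairwise (· > ·)) (hj : j ∈ is) (hcj : cond j = true)
    (hmax : ∀ i ∈ is, cond i = true → i ≤ j) : is.find? cond = some j := by
  induction is with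
  | nil => simp at hj
  | cons a t ih =>
    rw [List.find?_cons]
    rcases List.mem_cons.mp hj with rfl | hjt
    · simp [hcj]
    · have haj : j < a := (List.pairwise_cons.mp hPW).1 j hjt
      split
      · rename_i hca
        have := hmax a (List.mem_cons_self) hca
        omega
      · exact ih (List.pairwise_cons.mp hPW).2 hjt
          (fun i hi hci => hmax i (List.mem_cons_of_mem _ hi) hci)

-- find? on a length-descending list returns an element of maximal length among the matches
lemma pv_find?_sorted_max {ks : List (List Char)} {p : List Char → Bool} {k : List Char}
    (hPW : ks.Pairwise (fun a b => b.length ≤ a.length))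
    (h : ks.find? p = some k) : ∀ k' ∈ ks, p k' = true → k'.length ≤ k.length := by
  induction ks with
  | nil => simp at h
  | cons a t ih =>
    rw [List.find?_cons] at h
    intro k' hk' hpk'
    rcases List.pairwise_cons.mp hPW with ⟨hlen, hPWt⟩
    split at h
    · cases h
      rcases List.mem_cons.mp hk' with rfl | hkt
      · rfl
      · exact hlen _ hkt
    · rcases List.mem_cons.mp hk' with rfl | hkt
      · simp_all
      · exact ih hPWt h _ hkt hpk'

-- the step-4 match condition of A, characterised on the input
lemma pv_pchar (base k : List Char) :
    (PySem.Chars.startswith base (k ++ ['-']) || PySem.Chars.startswith base (k ++ ['_'])) = true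
      ↔ (k <+: base ∧ (base[k.length]? = some '-' ∨ base[k.length]? = some '_')) := by
  simp only [Bool.or_eq_true, PySem.Chars.startswith_iff, pv_prefix_snoc_iff]
  tauto

-- the per-index match condition of B, characterised on the input
lemma pv_condchar (base : List Char) (m : Nat) (hm : m < base.length) :
    pvCond base ((m : Int), base[m])
      ↔ (base.take m ∈ pvBucket.keys ∧ (base[m]? = some '-' ∨ base[m]? = some '_')) := by
  rw [pvCond]
  rw [Bool.and_eq_true, pv_isIn_singleton, PySem.List.slice_to_natCast,
    PySem.Dict.contains_eq_decide_mem_keys]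
  simp only [List.mem_cons, List.not_mem_nil, or_false, decide_eq_true_eq,
    List.getElem?_eq_getElem hm, Option.some.injEq]
  tauto

-- the bridge: A's key-list scan equals B's last-separator-match from the enumerate fold
lemma pv_bridge (base stripped : List Char) :
    pvALoop base stripped (PySem.List.sorted pvBucket.keys (fun k => PySem.Chars.len k) true)
      = ((((PySem.List.enumerate base 0).reverse.find? (pvCond base)).map
            (fun p => PySem.List.slice base none (some p.1))).getD stripped) := by
  rw [pvALoop_eq_find]
  rw [PySem.List.enumerate_eq_map_pyRange base ' ', ← List.map_reverse, List.find?_map]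
  have hcomp : (pvCond base) ∘ (fun j => (j, PySem.List.pyGetD base j ' '))
      = fun i => pvCond base (i, PySem.List.pyGetD base i ' ') := rfl
  rw [hcomp]
  set condI : Int → Bool := fun i => pvCond base (i, PySem.List.pyGetD base i ' ') with hcondI
  have hmemks : ∀ j : List Char,
      j ∈ PySem.List.sorted pvBucket.keys (fun k => PySem.Chars.len k) true ↔ j ∈ pvBucket.keys :=
    fun j => (PySem.List.sorted_perm _ _ _).mem_iff
  have hPW : (PySem.List.sorted pvBucket.keys (fun k => PySem.Chars.len k) true).Pairwise
      (fun a b => b.length ≤ a.length) := by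
    have := PySem.List.sorted_pairwise_rev pvBucket.keys (fun k => PySem.Chars.len k)
    simpa [PySem.Chars.len_eq] using this
  have hpos : ∀ j ∈ pvBucket.keys, 0 < j.length := by decide
  have hrngPW : ((PySem.List.pyRange 0 (PySem.List.len base)).reverse).Pairwise (· > ·) := by
    rw [List.pairwise_reverse]
    exact PySem.List.pairwise_lt_pyRange_one _ _
  have hcondN : ∀ m : Nat, m < base.length → (condI (m : Int)
      ↔ (base.take m ∈ pvBucket.keys ∧ (base[m]? = some '-' ∨ base[m]? = some '_'))) := by
    intro m hm
    rw [hcondI]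
    have hg : PySem.List.pyGetD base (m : Int) ' ' = base[m] := by
      rw [PySem.List.pyGetD_natCast, List.getD_eq_getElem?_getD, List.getElem?_eq_getElem hm,
        Option.getD_some]
    simp only [hg]
    exact pv_condchar base m hm
  -- from B's condition at an in-range index, recover a matching key of A
  have hfromB : ∀ i ∈ (PySem.List.pyRange 0 (PySem.List.len base)).reverse,
      condI i = true →
      ∃ m : Nat, (m : Int) = i ∧ m < base.length ∧ (base.take m).length = m ∧
        base.take m ∈ pvBucket.keys ∧
        (PySem.Chars.startswith base (base.take m ++ ['-'])
          || PySem.Chars.startswith base (base.take m ++ ['_'])) = true := by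
    intro i hi hc
    rw [List.mem_reverse, PySem.List.mem_pyRange_one] at hi
    have h0 : 0 ≤ i ∧ i < (base.length : Int) := by simpa [PySem.List.len_eq] using hi
    refine ⟨i.toNat, Int.toNat_of_nonneg h0.1, by omega, ?_, ?_, ?_⟩
    · simp; omega
    · rw [← Int.toNat_of_nonneg (a := i) h0.1] at hc
      exact ((hcondN i.toNat (by omega)).mp hc).1
    · rw [← Int.toNat_of_nonneg (a := i) h0.1] at hc
      obtain ⟨hk, hsep⟩ := (hcondN i.toNat (by omega)).mp hc
      rw [pv_pchar]
      refine ⟨List.take_prefix _ _, ?_⟩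
      have hlen : (base.take i.toNat).length = i.toNat := by simp; omega
      rw [hlen]
      exact hsep
  cases hfind : (PySem.List.sorted pvBucket.keys (fun k => PySem.Chars.len k) true).find?
      (fun k => PySem.Chars.startswith base (k ++ ['-'])
        || PySem.Chars.startswith base (k ++ ['_'])) with
  | none =>
    have hnone := List.find?_eq_none.mp hfind
    have hB : ((PySem.List.pyRange 0 (PySem.List.len base)).reverse).find? condI = none := by
      rw [List.find?_eq_none]
      intro i hi hc
      obtain ⟨m, _, _, _, hk, hp⟩ := hfromB i hi hc
      exact hnone (base.take m) ((hmemks _).mpr hk) hp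
    rw [hB]
    rfl
  | some k =>
    have hpk : (PySem.Chars.startswith base (k ++ ['-'])
        || PySem.Chars.startswith base (k ++ ['_'])) = true := by
      have := List.find?_some hfind
      simpa using this
    have hkks := List.mem_of_find?_eq_some hfind
    obtain ⟨hpre, hsep⟩ := (pv_pchar base k).mp hpk
    have hklt : k.length < base.length := by
      rcases hsep with h | h <;> exact (List.getElem?_eq_some_iff.mp h).1
    have htake : base.take k.length = k := (List.prefix_iff_eq_take.mp hpre).symm
    have hmax := pv_find?_sorted_max hPW hfind
    have hcj : condI ((k.length : Nat) : Int) = true := by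
      rw [Bool.eq_iff_iff, hcondN k.length hklt, htake]
      simp only [iff_true]
      exact ⟨(hmemks k).mp hkks, hsep⟩
    have hjmem : ((k.length : Nat) : Int) ∈ (PySem.List.pyRange 0 (PySem.List.len base)).reverse := by
      rw [List.mem_reverse, PySem.List.mem_pyRange_one]
      constructor
      · positivity
      · simp [PySem.List.len_eq]; omega
    have hmaxI : ∀ i ∈ (PySem.List.pyRange 0 (PySem.List.len base)).reverse,
        condI i = true → i ≤ ((k.length : Nat) : Int) := by
      intro i hi hc
      obtain ⟨m, hmi, _, hlenm, hk, hp⟩ := hfromB i hi hc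
      have := hmax (base.take m) ((hmemks _).mpr hk) hp
      rw [hlenm] at this
      omega
    rw [pv_find?_desc_eq_some hrngPW hjmem hcj hmaxI]
    simp only [Option.map_some, Option.getD_some, PySem.List.slice_to_natCast, htake]

-- ===== VERDICT (by name: the statement is the Claim_ definition above) =====
theorem normalize_company_key_py_spec : Claim_equal_normalize_company_key_py := by
  intro company_id _
  unfold Spec_normalize_company_key_py normalize_company_key_py normalize_company_key_py_alt
  simp only []
  set base := (PySem.Chars.splitOn (PySem.Chars.lower company_id.toList) ['.']).headD []
  rw [pv_fold_spec base (PySem.List.enumerate base 0) [] none]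
  simp only [List.nil_append, pv_filterMap_enumerate base 0]
  rw [← pv_stripped_eq base]
  split_ifs
  · rfl
  · rfl
  · rw [pv_bridge]
    cases (PySem.List.enumerate base 0).reverse.find? (pvCond base) <;> simp
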